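-- pv_equiv track=rewrite | github.com/sins621/jj_challenges | server.py | author_json_to_list_of_dicts
-- ===== SOURCE A (Python) =====
-- def author_json_to_list_of_dicts(author_list_data, items_per_page):
--     author_list = []
--
--     for author_item in author_list_data:
--         author_data = {
--             "name": author_item["name"],
--             "key": author_item["key"],
--             "top_work": author_item["top_work"],
--         }
--         author_list.append(author_data)
--
--     author_list = [
--         author_list[items_per_page * i : items_per_page * (i + 1)]
--         for i in range(len(author_list) // items_per_page + 1)
--     ]
--     return author_list
-- ===== SOURCE B (Python) =====
-- def author_json_to_list_of_dicts(author_list_data, items_per_page):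
--     n_pages = len(author_list_data) // items_per_page + 1
--     pages = []
--     rest = list(author_list_data)
--     for _ in range(n_pages):
--         chunk, rest = rest[:items_per_page], rest[items_per_page:]
--         pages.append([
--             {"name": a["name"], "key": a["key"], "top_work": a["top_work"]}
--             for a in chunk
--         ])
--     return pages
-- ===== Notes on version B (the rewrite author's own statement) =====
-- stated objective: alternative
-- what changed: A maps all items into records first and then builds pages by index arithmetic (slice [ipp*i : ipp*(i+1)] inside a range comprehension); B makes one pass of repeated take/drop chunking over the raw input, mapping each chunk to records as the page is emitted.
import Mathlib
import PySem

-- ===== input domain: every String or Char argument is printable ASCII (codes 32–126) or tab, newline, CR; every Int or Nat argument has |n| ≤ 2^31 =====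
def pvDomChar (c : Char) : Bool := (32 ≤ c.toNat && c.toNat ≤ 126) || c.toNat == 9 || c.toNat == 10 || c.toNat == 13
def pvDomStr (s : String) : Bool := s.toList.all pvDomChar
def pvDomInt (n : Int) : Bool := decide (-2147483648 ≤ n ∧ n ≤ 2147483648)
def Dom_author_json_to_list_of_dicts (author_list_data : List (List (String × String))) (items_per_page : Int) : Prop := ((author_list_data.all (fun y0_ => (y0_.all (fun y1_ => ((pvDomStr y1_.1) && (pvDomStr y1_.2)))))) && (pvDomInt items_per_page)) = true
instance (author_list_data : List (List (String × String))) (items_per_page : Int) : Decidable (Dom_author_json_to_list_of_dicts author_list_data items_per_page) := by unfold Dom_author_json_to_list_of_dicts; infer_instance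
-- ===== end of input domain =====

-- B chunks the raw list by repeated take/drop and maps each chunk as its page is emitted,
-- instead of A's map-everything-then-slice-by-index comprehension; same cost, different decomposition.

-- ===== PORT A =====
-- the dict {"name": item["name"], "key": item["key"], "top_work": item["top_work"]};
-- lookup is first-match on the association list; the getD "" default is never reached
-- under Pre_ (Python raises KeyError exactly where the lookup is none)
def pvRec (item : List (String × String)) : List (String × String) :=
  [("name", (item.lookup "name").getD ""),
   ("key", (item.lookup "key").getD ""),
   ("top_work", (item.lookup "top_work").getD "")]

def author_json_to_list_of_dicts (author_list_data : List (List (String × String))) (items_per_page : Int) : List (List (List (String × String))) :=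
  let author_list := author_list_data.foldl (fun acc item => acc ++ [pvRec item]) []
  (PySem.List.pyRange 0 (PySem.Int.floordiv (author_list.length : Int) items_per_page + 1) 1).map
    (fun i => PySem.List.slice author_list (some (items_per_page * i)) (some (items_per_page * (i + 1))))

-- ===== PORT B =====
-- the 'for _ in range(n_pages)' loop: state = (rest, pages), fuel = max(n_pages, 0)
def pvGo (items_per_page : Int) : Nat → List (List (String × String)) → List (List (List (String × String))) → List (List (List (String × String)))
  | 0, _, pages => pages
  | k + 1, rest, pages =>
      pvGo items_per_page k (PySem.List.slice rest (some items_per_page) none)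
        (pages ++ [(PySem.List.slice rest none (some items_per_page)).map pvRec])

def author_json_to_list_of_dicts_alt (author_list_data : List (List (String × String))) (items_per_page : Int) : List (List (List (String × String))) :=
  let n_pages := PySem.Int.floordiv (author_list_data.length : Int) items_per_page + 1
  pvGo items_per_page n_pages.toNat author_list_data []

-- ===== PRECONDITION & SPEC =====
-- Pre_ excludes exactly the inputs where the Python A raises: items_per_page = 0
-- (ZeroDivisionError) and items whose dict lacks one of the three keys (KeyError).
def Pre_author_json_to_list_of_dicts (author_list_data : List (List (String × String))) (items_per_page : Int) : Prop :=
  items_per_page ≠ 0 ∧ ∀ item ∈ author_list_data,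
    (item.lookup "name").isSome ∧ (item.lookup "key").isSome ∧ (item.lookup "top_work").isSome
instance (author_list_data : List (List (String × String))) (items_per_page : Int) : Decidable (Pre_author_json_to_list_of_dicts author_list_data items_per_page) := by unfold Pre_author_json_to_list_of_dicts; infer_instance

def pvWitness_author_json_to_list_of_dicts : (List (List (String × String))) × Int :=
  ([[("name", "A. Author"), ("key", "OL1A"), ("top_work", "Book")],
    [("name", "B. Author"), ("key", "OL2A"), ("top_work", "Other")],
    [("name", "C. Author"), ("key", "OL3A"), ("top_work", "Third")]], 2)

def Spec_author_json_to_list_of_dicts (author_list_data : List (List (String × String))) (items_per_page : Int) (out : List (List (List (String × String)))) : Prop := out = author_json_to_list_of_dicts_alt author_list_data items_per_page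
instance (author_list_data : List (List (String × String))) (items_per_page : Int) (out : List (List (List (String × String)))) : Decidable (Spec_author_json_to_list_of_dicts author_list_data items_per_page out) := by unfold Spec_author_json_to_list_of_dicts; infer_instance

-- ===== CLAIM (what is proved, stated in full; the proofs are below) =====
def Claim_equal_author_json_to_list_of_dicts : Prop := ∀ (author_list_data : List (List (String × String))) (items_per_page : Int), Dom_author_json_to_list_of_dicts author_list_data items_per_page → Pre_author_json_to_list_of_dicts author_list_data items_per_page → Spec_author_json_to_list_of_dicts author_list_data items_per_page (author_json_to_list_of_dicts author_list_data items_per_page)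

-- ===== LEMMAS AND PROOFS =====

-- B's loop, unrolled: fuel m starting from rest and acc appends the m chunk-pages of rest.
theorem pvGo_spec (p : Nat) :
    ∀ (m : Nat) (rest : List (List (String × String))) (acc : List (List (List (String × String)))),
      pvGo (p : Int) m rest acc
        = acc ++ (List.range m).map (fun j => ((rest.drop (p * j)).take p).map pvRec) := by
  intro m
  induction m with
  | zero => intro rest acc; simp [pvGo]
  | succ m ih =>
    intro rest acc
    rw [pvGo, PySem.List.slice_from_natCast, PySem.List.slice_to_natCast, ih,
        List.range_succ_eq_map]
    simp [List.map_map, Function.comp_def, List.drop_drop, Nat.mul_succ, Nat.add_comm]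

-- 0 // b and (positive) // (negative) for A's page count
theorem pvFd_zero (b : Int) (hb : b < 0) : PySem.Int.floordiv 0 b = 0 := by
  have h := PySem.Int.floordiv_mul_add_mod 0 b
  have h2 := PySem.Int.mod_neg_bounds (a := 0) hb
  nlinarith [h, h2.1, h2.2]

theorem pvFd_neg (a b : Int) (ha : 0 < a) (hb : b < 0) : PySem.Int.floordiv a b ≤ -1 := by
  have h := PySem.Int.floordiv_mul_add_mod a b
  have h2 := PySem.Int.mod_neg_bounds (a := a) hb
  nlinarith [h, h2.1, h2.2]

theorem author_json_to_list_of_dicts_spec : Claim_equal_author_json_to_list_of_dicts := by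
  intro data ipp _ hpre
  show _ = author_json_to_list_of_dicts_alt data ipp
  unfold author_json_to_list_of_dicts author_json_to_list_of_dicts_alt
  rw [PySem.List.foldl_append_singleton_eq_map]
  simp only [List.nil_append, List.length_map]
  rcases lt_trichotomy ipp 0 with hneg | hz | hpos
  · -- items_per_page < 0
    rcases data with _ | ⟨d, ds⟩
    ·
      simp only [List.map_nil, List.length_nil, Nat.cast_zero, pvFd_zero ipp hneg]
      have h01 : PySem.List.pyRange 0 (0 + 1) 1 = [0] := by decide
      rw [h01]
      simp [pvGo, PySem.List.slice]
    · have hlen : 0 < (((d :: ds).length) : Int) := by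
        simp only [List.length_cons]; push_cast; omega
      have hfd := pvFd_neg _ _ hlen hneg
      rw [PySem.List.pyRange_one_eq_nil (by omega)]
      have : (PySem.Int.floordiv (((d :: ds).length) : Int) ipp + 1).toNat = 0 := by omega
      rw [this]
      simp [pvGo]
  · exact absurd hz hpre.1
  · -- items_per_page > 0
    obtain ⟨p, rfl⟩ : ∃ p : Nat, ipp = (p : Int) := ⟨ipp.toNat, (Int.toNat_of_nonneg hpos.le).symm⟩
    rw [pvGo_spec, List.nil_append, PySem.List.pyRange_one]
    simp only [Int.sub_zero, List.map_map]
    apply List.map_congr_left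
    intro j hj
    simp only [Function.comp_apply]
    have h1 : (p : Int) * (0 + (j : Int)) = ((p * j : Nat) : Int) := by push_cast; ring
    have h2 : (p : Int) * ((0 + (j : Int)) + 1) = ((p * j : Nat) : Int) + (p : Int) := by
      push_cast; ring
    rw [h1, h2, PySem.List.slice_natCast_add]
    rw [List.map_take, List.map_drop]
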